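-- pv_equiv track=rewrite | github.com/foolish127/osrs-ironman-progession-tracker | scripts/update_stats.py | parse_pets_yaml
-- ===== SOURCE A (Python) =====
-- def parse_pets_yaml(content):
--     """Parse the flat pets.yaml structure"""
--     result = {'obtained': [], 'missing': []}
--     current_section = None
--
--     for line in content.split('\n'):
--         if not line or line.startswith('#'):
--             continue
--
--         stripped = line.strip()
--
--         if stripped == 'obtained:':
--             current_section = 'obtained'
--         elif stripped == 'missing:':
--             current_section = 'missing'
--         elif stripped.startswith('- ') and current_section:
--             item_text = stripped[2:]
--             if ' | ' in item_text:
--                 parts = item_text.split(' | ', 1)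
--                 name = parts[0].strip()
--                 date = parts[1].strip() if parts[1].strip() else None
--             elif item_text.endswith(' |'):
--                 name = item_text[:-2].strip()
--                 date = None
--             else:
--                 name = item_text.strip()
--                 date = None
--
--             result[current_section].append({'name': name, 'date': date})
--
--     return result
-- ===== SOURCE B (Python) =====
-- def _parse_item(text):
--     if ' | ' in text:
--         name, date = text.split(' | ', 1)
--         date = date.strip()
--         return {'name': name.strip(), 'date': date if date else None}
--     if text.endswith(' |'):
--         return {'name': text[:-2].strip(), 'date': None}
--     return {'name': text.strip(), 'date': None}
--
--
-- def _section_items(lines, header):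
--     items = []
--     active = False
--     for s in lines:
--         if s == 'obtained:' or s == 'missing:':
--             active = (s == header)
--         elif active and s.startswith('- '):
--             items.append(_parse_item(s[2:]))
--     return items
--
--
-- def parse_pets_yaml(content):
--     lines = [l.strip() for l in content.split('\n') if l and not l.startswith('#')]
--     return {'obtained': _section_items(lines, 'obtained:'),
--             'missing': _section_items(lines, 'missing:')}
-- ===== Notes on version B (the rewrite author's own statement) =====
-- stated objective: alternative
-- what changed: A builds both sections in one stateful scan that appends into a dict keyed by the current section; B first strips/filters the lines in a comprehension and then runs two independent per-section scans (plus a separate item-parsing helper), assembling the result dict from the two lists.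
import Mathlib
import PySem

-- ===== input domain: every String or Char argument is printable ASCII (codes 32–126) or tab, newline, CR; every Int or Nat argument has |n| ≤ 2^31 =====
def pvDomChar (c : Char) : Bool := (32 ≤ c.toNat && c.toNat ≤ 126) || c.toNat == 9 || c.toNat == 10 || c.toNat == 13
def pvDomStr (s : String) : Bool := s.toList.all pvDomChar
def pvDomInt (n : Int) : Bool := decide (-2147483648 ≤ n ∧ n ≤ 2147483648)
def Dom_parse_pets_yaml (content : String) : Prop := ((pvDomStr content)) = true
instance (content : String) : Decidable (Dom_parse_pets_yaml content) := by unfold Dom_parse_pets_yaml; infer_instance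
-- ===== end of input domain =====

-- B replaces A's single stateful scan building a dict with a strip/filter pass followed by two
-- independent per-section scans (objective: alternative decomposition, same cost).

-- ===== PORT A =====
-- loop body of A's single for-loop; state = (result dict, current_section)
def pvStepA (st : PySem.Dict String (List (List (String × Option String))) × Option String)
    (line : String) : PySem.Dict String (List (List (String × Option String))) × Option String :=
  if line == "" || PySem.Str.startswith line "#" then st
  else
    let stripped := PySem.Str.strip line
    if stripped == "obtained:" then (st.1, some "obtained")
    else if stripped == "missing:" then (st.1, some "missing")
    else if PySem.Str.startswith stripped "- " then
      match st.2 with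
      | some sec =>
          let item_text := PySem.Str.slice stripped (some 2) none
          let item : List (String × Option String) :=
            if PySem.Str.isIn " | " item_text then
              -- ' | ' occurs in item_text, so the split has ≥ 2 parts: the getD defaults are unreachable
              let parts := (PySem.Str.splitMax? item_text " | " 1).getD []
              let name := PySem.Str.strip ((PySem.List.pyGet? parts 0).getD "")
              let date := PySem.Str.strip ((PySem.List.pyGet? parts 1).getD "")
              [("name", some name), ("date", if date == "" then none else some date)]
            else if PySem.Str.endswith item_text " |" then
              [("name", some (PySem.Str.strip (PySem.Str.slice item_text none (some (-2))))), ("date", none)]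
            else
              [("name", some (PySem.Str.strip item_text)), ("date", none)]
          (st.1.modify sec [] (fun l => l ++ [item]), st.2)
      | none => st
    else st

def parse_pets_yaml (content : String) : List (String × List (List (String × Option String))) :=
  -- content.split('\n'): sep ≠ "" so split? is some
  (((PySem.Str.split? content "\n").getD []).foldl pvStepA
      (PySem.Dict.ofList [("obtained", []), ("missing", [])], none)).1.items

-- ===== PORT B =====
def pvParseItem (text : String) : List (String × Option String) :=
  if PySem.Str.isIn " | " text then
    -- ' | ' occurs in text, so the split has ≥ 2 parts: the getD defaults are unreachable
    let parts := (PySem.Str.splitMax? text " | " 1).getD []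
    let name := PySem.Str.strip ((PySem.List.pyGet? parts 0).getD "")
    let date := PySem.Str.strip ((PySem.List.pyGet? parts 1).getD "")
    [("name", some name), ("date", if date == "" then none else some date)]
  else if PySem.Str.endswith text " |" then
    [("name", some (PySem.Str.strip (PySem.Str.slice text none (some (-2))))), ("date", none)]
  else
    [("name", some (PySem.Str.strip text)), ("date", none)]

-- loop body of _section_items; state = (items, active)
def pvStepB (header : String) (st : List (List (String × Option String)) × Bool) (s : String) :
    List (List (String × Option String)) × Bool :=
  if s == "obtained:" || s == "missing:" then (st.1, s == header)
  else if st.2 && PySem.Str.startswith s "- " then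
    (st.1 ++ [pvParseItem (PySem.Str.slice s (some 2) none)], st.2)
  else st

def pvSectionItems (lines : List String) (header : String) :
    List (List (String × Option String)) :=
  (lines.foldl (pvStepB header) ([], false)).1

def parse_pets_yaml_alt (content : String) : List (String × List (List (String × Option String))) :=
  let lines := (((PySem.Str.split? content "\n").getD []).filter
      (fun l => !(l == "" || PySem.Str.startswith l "#"))).map PySem.Str.strip
  [("obtained", pvSectionItems lines "obtained:"), ("missing", pvSectionItems lines "missing:")]

-- ===== PRECONDITION & SPEC =====
def Spec_parse_pets_yaml (content : String) (out : List (String × List (List (String × Option String)))) : Prop := out = parse_pets_yaml_alt content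
instance (content : String) (out : List (String × List (List (String × Option String)))) : Decidable (Spec_parse_pets_yaml content out) := by unfold Spec_parse_pets_yaml; infer_instance

-- ===== CLAIM (what is proved, stated in full; the proofs are below) =====
def Claim_equal_parse_pets_yaml : Prop := ∀ (content : String), Dom_parse_pets_yaml content → Spec_parse_pets_yaml content (parse_pets_yaml content)

-- ===== LEMMAS AND PROOFS =====



-- B's preprocessing comprehension over a line list
def pvPrep (lines : List String) : List String :=
  (lines.filter (fun l => !(l == "" || PySem.Str.startswith l "#"))).map PySem.Str.strip

lemma pvPrep_skip (l : String) (t : List String)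
    (h : (l == "" || PySem.Str.startswith l "#") = true) : pvPrep (l :: t) = pvPrep t := by
  simp only [pvPrep, List.filter_cons]
  rw [h]; simp

lemma pvPrep_keep (l : String) (t : List String)
    (h : (l == "" || PySem.Str.startswith l "#") = false) :
    pvPrep (l :: t) = PySem.Str.strip l :: pvPrep t := by
  simp only [pvPrep, List.filter_cons]
  rw [h]; simp

lemma pvStepA_skip (st : PySem.Dict String (List (List (String × Option String))) × Option String)
    (l : String) (h : (l == "" || PySem.Str.startswith l "#") = true) : pvStepA st l = st := by
  simp only [pvStepA]; rw [if_pos h]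

lemma pvStepA_ob (st : PySem.Dict String (List (List (String × Option String))) × Option String)
    (l : String) (h1 : (l == "" || PySem.Str.startswith l "#") = false)
    (h2 : PySem.Str.strip l = "obtained:") : pvStepA st l = (st.1, some "obtained") := by
  simp only [pvStepA]; rw [if_neg (by simpa using h1), if_pos (by simpa using h2)]

lemma pvStepA_mi (st : PySem.Dict String (List (List (String × Option String))) × Option String)
    (l : String) (h1 : (l == "" || PySem.Str.startswith l "#") = false)
    (h2 : PySem.Str.strip l ≠ "obtained:") (h3 : PySem.Str.strip l = "missing:") :
    pvStepA st l = (st.1, some "missing") := by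
  simp only [pvStepA]
  rw [if_neg (by simpa using h1), if_neg (by simpa using h2), if_pos (by simpa using h3)]

lemma pvStepA_none (d : PySem.Dict String (List (List (String × Option String))))
    (l : String) (h1 : (l == "" || PySem.Str.startswith l "#") = false)
    (h2 : PySem.Str.strip l ≠ "obtained:") (h3 : PySem.Str.strip l ≠ "missing:") :
    pvStepA (d, none) l = (d, none) := by
  simp only [pvStepA]
  rw [if_neg (by simpa using h1), if_neg (by simpa using h2), if_neg (by simpa using h3)]
  split <;> rfl

lemma pvStepA_bullet (d : PySem.Dict String (List (List (String × Option String))))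
    (sec l : String) (h1 : (l == "" || PySem.Str.startswith l "#") = false)
    (h2 : PySem.Str.strip l ≠ "obtained:") (h3 : PySem.Str.strip l ≠ "missing:")
    (h4 : PySem.Str.startswith (PySem.Str.strip l) "- " = true) :
    pvStepA (d, some sec) l
      = (d.modify sec [] (fun xs => xs ++ [pvParseItem (PySem.Str.slice (PySem.Str.strip l) (some 2) none)]), some sec) := by
  simp only [pvStepA, pvParseItem]
  rw [if_neg (by simpa using h1), if_neg (by simpa using h2), if_neg (by simpa using h3),
    if_pos (by simpa using h4)]

lemma pvStepA_nobullet (d : PySem.Dict String (List (List (String × Option String))))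
    (sec : Option String) (l : String) (h1 : (l == "" || PySem.Str.startswith l "#") = false)
    (h2 : PySem.Str.strip l ≠ "obtained:") (h3 : PySem.Str.strip l ≠ "missing:")
    (h4 : PySem.Str.startswith (PySem.Str.strip l) "- " = false) :
    pvStepA (d, sec) l = (d, sec) := by
  simp only [pvStepA]
  rw [if_neg (by simpa using h1), if_neg (by simpa using h2), if_neg (by simpa using h3),
    if_neg (by simpa using h4)]

lemma pvStepB_header (header : String) (st : List (List (String × Option String)) × Bool)
    (s : String) (h : (s == "obtained:" || s == "missing:") = true) :
    pvStepB header st s = (st.1, s == header) := by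
  simp only [pvStepB]; rw [if_pos h]

lemma pvStepB_bullet (header : String) (I : List (List (String × Option String))) (s : String)
    (h : (s == "obtained:" || s == "missing:") = false)
    (h4 : PySem.Str.startswith s "- " = true) :
    pvStepB header (I, true) s = (I ++ [pvParseItem (PySem.Str.slice s (some 2) none)], true) := by
  simp only [pvStepB]; rw [if_neg (by simpa using h), if_pos (by simpa using h4)]

lemma pvStepB_inactive (header : String) (I : List (List (String × Option String))) (s : String)
    (h : (s == "obtained:" || s == "missing:") = false) :
    pvStepB header (I, false) s = (I, false) := by
  simp only [pvStepB]; rw [if_neg (by simpa using h), if_neg (by simp)]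

lemma pvStepB_nobullet (header : String) (st : List (List (String × Option String)) × Bool)
    (s : String) (h : (s == "obtained:" || s == "missing:") = false)
    (h4 : PySem.Str.startswith s "- " = false) :
    pvStepB header st s = st := by
  have h4' : PySem.Chars.startswith s.toList ['-', ' '] = false := by simpa using h4
  simp only [pvStepB]; rw [if_neg (by simpa using h), if_neg (by simp [h4'])]

-- the two-key dict: modify touches exactly its key
lemma pvModOb (O M : List (List (String × Option String)))
    (f : List (List (String × Option String)) → List (List (String × Option String))) :
    (PySem.Dict.mk [("obtained", O), ("missing", M)]).modify "obtained" [] f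
      = PySem.Dict.mk [("obtained", f O), ("missing", M)] := by
  simp [PySem.Dict.modify, PySem.Dict.insert, PySem.Dict.getD, PySem.Dict.get?]

lemma pvModMi (O M : List (List (String × Option String)))
    (f : List (List (String × Option String)) → List (List (String × Option String))) :
    (PySem.Dict.mk [("obtained", O), ("missing", M)]).modify "missing" [] f
      = PySem.Dict.mk [("obtained", O), ("missing", f M)] := by
  simp [PySem.Dict.modify, PySem.Dict.insert, PySem.Dict.getD, PySem.Dict.get?]

-- simulation: A's single fold over the raw lines equals, per key, B's per-section folds
-- over the preprocessed lines, for any reachable state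
lemma pvSim (lines : List String) (O M : List (List (String × Option String)))
    (sec : Option String)
    (hsec : sec = none ∨ sec = some "obtained" ∨ sec = some "missing") :
    (lines.foldl pvStepA (PySem.Dict.mk [("obtained", O), ("missing", M)], sec)).1.items
    = [("obtained", ((pvPrep lines).foldl (pvStepB "obtained:") (O, sec == some "obtained")).1),
       ("missing", ((pvPrep lines).foldl (pvStepB "missing:") (M, sec == some "missing")).1)] := by
  induction lines generalizing O M sec with
  | nil => simp [pvPrep]
  | cons l t ih =>
    by_cases h1 : (l == "" || PySem.Str.startswith l "#") = true
    · rw [List.foldl_cons, pvStepA_skip _ _ h1, pvPrep_skip _ _ h1]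
      exact ih O M sec hsec
    · rw [Bool.not_eq_true] at h1
      rw [pvPrep_keep _ _ h1, List.foldl_cons, List.foldl_cons, List.foldl_cons]
      by_cases h2 : PySem.Str.strip l = "obtained:"
      · rw [pvStepA_ob _ _ h1 h2, h2,
          pvStepB_header _ _ _ (by decide), pvStepB_header _ _ _ (by decide)]
        have := ih O M (some "obtained") (by simp)
        rw [show ((some "obtained" : Option String) == some "obtained") = true by decide,
          show ((some "obtained" : Option String) == some "missing") = false by decide] at this
        rw [show (("obtained:" : String) == "obtained:") = true by decide,
          show (("obtained:" : String) == "missing:") = false by decide]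
        exact this
      · by_cases h3 : PySem.Str.strip l = "missing:"
        · rw [pvStepA_mi _ _ h1 h2 h3, h3,
            pvStepB_header _ _ _ (by decide), pvStepB_header _ _ _ (by decide)]
          have := ih O M (some "missing") (by simp)
          rw [show ((some "missing" : Option String) == some "obtained") = false by decide,
            show ((some "missing" : Option String) == some "missing") = true by decide] at this
          rw [show (("missing:" : String) == "obtained:") = false by decide,
            show (("missing:" : String) == "missing:") = true by decide]
          exact this
        · have hh : (PySem.Str.strip l == "obtained:" || PySem.Str.strip l == "missing:") = false := by
            simp [h2, h3]
          by_cases h4 : PySem.Str.startswith (PySem.Str.strip l) "- " = true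
          · rcases hsec with rfl | rfl | rfl
            · rw [pvStepA_none _ _ h1 h2 h3,
                show ((none : Option String) == some "obtained") = false by decide,
                show ((none : Option String) == some "missing") = false by decide,
                pvStepB_inactive _ _ _ hh, pvStepB_inactive _ _ _ hh]
              have := ih O M none (Or.inl rfl)
              rw [show ((none : Option String) == some "obtained") = false by decide,
                show ((none : Option String) == some "missing") = false by decide] at this
              exact this
            · rw [pvStepA_bullet _ _ _ h1 h2 h3 h4, pvModOb,
                show ((some "obtained" : Option String) == some "obtained") = true by decide,
                show ((some "obtained" : Option String) == some "missing") = false by decide,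
                pvStepB_bullet _ _ _ hh h4, pvStepB_inactive _ _ _ hh]
              have := ih (O ++ [pvParseItem (PySem.Str.slice (PySem.Str.strip l) (some 2) none)]) M
                (some "obtained") (by simp)
              rw [show ((some "obtained" : Option String) == some "obtained") = true by decide,
                show ((some "obtained" : Option String) == some "missing") = false by decide] at this
              exact this
            · rw [pvStepA_bullet _ _ _ h1 h2 h3 h4, pvModMi,
                show ((some "missing" : Option String) == some "obtained") = false by decide,
                show ((some "missing" : Option String) == some "missing") = true by decide,
                pvStepB_inactive _ _ _ hh, pvStepB_bullet _ _ _ hh h4]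
              have := ih O (M ++ [pvParseItem (PySem.Str.slice (PySem.Str.strip l) (some 2) none)])
                (some "missing") (by simp)
              rw [show ((some "missing" : Option String) == some "obtained") = false by decide,
                show ((some "missing" : Option String) == some "missing") = true by decide] at this
              exact this
          · rw [Bool.not_eq_true] at h4
            rw [pvStepA_nobullet _ _ _ h1 h2 h3 h4,
              pvStepB_nobullet _ _ _ hh h4, pvStepB_nobullet _ _ _ hh h4]
            exact ih O M sec hsec

-- ===== VERDICT (by name: the statement is the Claim_ definition above) =====
theorem parse_pets_yaml_spec : Claim_equal_parse_pets_yaml := by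
  intro content _
  unfold Spec_parse_pets_yaml parse_pets_yaml parse_pets_yaml_alt pvSectionItems
  have := pvSim ((PySem.Str.split? content "\n").getD []) [] [] none (Or.inl rfl)
  rw [show ((none : Option String) == some "obtained") = false by decide,
    show ((none : Option String) == some "missing") = false by decide] at this
  rw [show (PySem.Dict.ofList [("obtained", ([] : List (List (String × Option String)))), ("missing", [])])
      = PySem.Dict.mk [("obtained", []), ("missing", [])] by decide]
  rw [this]
  simp [pvPrep]
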